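-- pv_equiv track=rewrite | github.com/markvandendool/roxy | services__QUARANTINED_20260105_175000/validation_loop.py | _validate_repo_info
-- ===== SOURCE A (Python) =====
-- def _validate_repo_info(response: str) -> bool:
--     """Validate repository information is accurate"""
--     # Check for known incorrect information
--     incorrect_info = [
--         "music streaming business",
--         "streaming platform",
--         "Tool A", "Tool B", "Tool C",
--     ]
--
--     for info in incorrect_info:
--         if info.lower() in response.lower():
--             return False
--
--     return True
-- ===== SOURCE B (Python) =====
-- def _validate_repo_info(response: str) -> bool:
--     """Validate repository information is accurate"""
--     # Single-pass scan: lowercase the response once, then walk its positions and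
--     # test the (pre-lowered) forbidden phrases as prefixes at each position.
--     phrases = (
--         "music streaming business",
--         "streaming platform",
--         "tool a", "tool b", "tool c",
--     )
--     low = response.lower()
--     return not any(
--         low.startswith(p, i) for i in range(len(low)) for p in phrases
--     )
-- ===== Notes on version B (the rewrite author's own statement) =====
-- stated objective: alternative
-- what changed: B lowercases the response once and does a single position-driven scan, testing each forbidden phrase as a prefix at every position, instead of A's phrase-driven loop that re-lowercases the response and runs a fresh substring search per phrase.
import Mathlib
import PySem

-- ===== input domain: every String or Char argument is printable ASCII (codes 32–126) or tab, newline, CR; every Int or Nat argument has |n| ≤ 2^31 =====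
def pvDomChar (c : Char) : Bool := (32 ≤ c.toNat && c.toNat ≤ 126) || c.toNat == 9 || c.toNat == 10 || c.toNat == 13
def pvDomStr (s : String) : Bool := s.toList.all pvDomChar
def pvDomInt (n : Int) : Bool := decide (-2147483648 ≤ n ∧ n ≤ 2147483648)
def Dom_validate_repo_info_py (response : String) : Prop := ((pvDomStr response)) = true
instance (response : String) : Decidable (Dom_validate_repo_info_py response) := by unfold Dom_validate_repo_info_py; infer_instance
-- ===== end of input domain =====

-- B lowercases the response once and scans its positions, testing each forbidden
-- phrase as a prefix there; A loops over the phrases and runs one substring search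
-- (with a fresh response.lower()) per phrase. Return values agree everywhere.

-- ===== PORT A =====
-- the 'for info in incorrect_info' loop with its early 'return False'
def pvALoop (infos : List String) (response : String) : Bool :=
  match infos with
  | [] => true
  | info :: rest =>
      if PySem.Str.isIn (PySem.Str.lower info) (PySem.Str.lower response) then false
      else pvALoop rest response

def validate_repo_info_py (response : String) : Bool :=
  pvALoop ["music streaming business", "streaming platform", "Tool A", "Tool B", "Tool C"] response

-- ===== PORT B =====
-- 'any(low.startswith(p, i) for i in range(len(low)) for p in phrases)':
-- walk the suffixes of the lowered response; at each position test every phrase as a prefix.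
def pvScan (phrases : List (List Char)) : List Char → Bool
  | [] => false
  | c :: rest => phrases.any (fun p => p.isPrefixOf (c :: rest)) || pvScan phrases rest

def validate_repo_info_py_alt (response : String) : Bool :=
  !(pvScan ["music streaming business".toList, "streaming platform".toList,
            "tool a".toList, "tool b".toList, "tool c".toList]
      (PySem.Chars.lower response.toList))

-- ===== PRECONDITION & SPEC =====
def Spec_validate_repo_info_py (response : String) (out : Bool) : Prop := out = validate_repo_info_py_alt response
instance (response : String) (out : Bool) : Decidable (Spec_validate_repo_info_py response out) := by unfold Spec_validate_repo_info_py; infer_instance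

-- ===== CLAIM (what is proved, stated in full; the proofs are below) =====
def Claim_equal_validate_repo_info_py : Prop := ∀ (response : String), Dom_validate_repo_info_py response → Spec_validate_repo_info_py response (validate_repo_info_py response)

-- ===== LEMMAS AND PROOFS =====

-- B's position scan finds exactly the phrases occurring as substrings (phrases nonempty).
theorem pvScan_eq_any_isIn (phrases : List (List Char)) (h : ∀ p ∈ phrases, p ≠ []) :
    ∀ s : List Char, pvScan phrases s = phrases.any (fun p => PySem.Chars.isIn p s) := by
  intro s
  induction s with
  | nil =>
      simp only [pvScan]
      symm
      simp only [List.any_eq_false]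
      intro p hp
      rw [PySem.Chars.isIn_iff_infix]
      intro hinf
      exact h p hp (List.eq_nil_of_infix_nil hinf)
  | cons c rest ih =>
      simp only [pvScan, ih]
      rw [Bool.eq_iff_iff]
      simp only [Bool.or_eq_true, List.any_eq_true, List.isPrefixOf_iff_prefix,
        PySem.Chars.isIn_iff_infix, List.infix_cons_iff]
      constructor
      · rintro (⟨p, hp, h'⟩ | ⟨p, hp, h'⟩)
        · exact ⟨p, hp, Or.inl h'⟩
        · exact ⟨p, hp, Or.inr h'⟩
      · rintro ⟨p, hp, (h' | h')⟩
        · exact Or.inl ⟨p, hp, h'⟩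
        · exact Or.inr ⟨p, hp, h'⟩

-- ===== VERDICT (by name: the statement is the Claim_ definition above) =====
theorem validate_repo_info_py_spec : Claim_equal_validate_repo_info_py := by
  intro response _
  unfold Spec_validate_repo_info_py validate_repo_info_py validate_repo_info_py_alt
  rw [pvScan_eq_any_isIn _ (by decide)]
  simp only [pvALoop, List.any_cons, List.any_nil, PySem.Str.isIn_eq, PySem.Str.toList_lower]
  generalize PySem.Chars.lower response.toList = L
  have h1 : (PySem.Chars.lower "music streaming business".toList) = "music streaming business".toList := by decide
  have h2 : (PySem.Chars.lower "streaming platform".toList) = "streaming platform".toList := by decide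
  have h3 : (PySem.Chars.lower "Tool A".toList) = "tool a".toList := by decide
  have h4 : (PySem.Chars.lower "Tool B".toList) = "tool b".toList := by decide
  have h5 : (PySem.Chars.lower "Tool C".toList) = "tool c".toList := by decide
  rw [h1, h2, h3, h4, h5]
  cases PySem.Chars.isIn "music streaming business".toList L <;>
    cases PySem.Chars.isIn "streaming platform".toList L <;>
      cases PySem.Chars.isIn "tool a".toList L <;>
        cases PySem.Chars.isIn "tool b".toList L <;>
          cases PySem.Chars.isIn "tool c".toList L <;> simp
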